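-- pv_equiv track=rewrite | github.com/tanaykhede/bbd_ai_hackathon | workflow_engine/workflow/doa/steps.py | _normalize_bool_ops
-- ===== SOURCE A (Python) =====
-- def _normalize_bool_ops(s: str) -> str:
--     out: list[str] = []
--     in_squote = False
--     in_dquote = False
--     i = 0
--     n = len(s)
--     def is_word_char(c: str) -> bool:
--         return c.isalnum() or c == "_"
--     while i < n:
--         ch = s[i]
--         if ch == "'" and not in_dquote:
--             in_squote = not in_squote
--             out.append(ch); i += 1; continue
--         if ch == '"' and not in_squote:
--             in_dquote = not in_dquote
--             out.append(ch); i += 1; continue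
--         if not in_squote and not in_dquote:
--             if i + 3 <= n and s[i:i+3].lower() == "and":
--                 prev_ok = (i == 0) or not is_word_char(s[i-1])
--                 next_ok = (i + 3 == n) or not is_word_char(s[i+3])
--                 if prev_ok and next_ok:
--                     out.append("&&"); i += 3; continue
--             if i + 2 <= n and s[i:i+2].lower() == "or":
--                 prev_ok = (i == 0) or not is_word_char(s[i-1])
--                 next_ok = (i + 2 == n) or not is_word_char(s[i+2])
--                 if prev_ok and next_ok:
--                     out.append("||"); i += 2; continue
--         out.append(ch); i += 1
--     return "".join(out)
-- ===== SOURCE B (Python) =====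
-- def _normalize_bool_ops(s: str) -> str:
--     n = len(s)
--     parts = []
--     i = 0
--     while i < n:
--         c = s[i]
--         if c == "'" or c == '"':
--             j = i + 1
--             while j < n and s[j] != c:
--                 j += 1
--             if j < n:
--                 j += 1  # include the closing quote
--             parts.append(s[i:j])
--             i = j
--         else:
--             j = i
--             while j < n and s[j] != "'" and s[j] != '"':
--                 j += 1
--             parts.append(_replace_words(s[i:j]))
--             i = j
--     return "".join(parts)
--
--
-- def _replace_words(t: str) -> str:
--     def is_word(c: str) -> bool:
--         return c.isalnum() or c == "_"
--     n = len(t)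
--     out = []
--     i = 0
--     while i < n:
--         if is_word(t[i]):
--             j = i
--             while j < n and is_word(t[j]):
--                 j += 1
--             w = t[i:j]
--             lw = w.lower()
--             out.append("&&" if lw == "and" else "||" if lw == "or" else w)
--             i = j
--         else:
--             out.append(t[i])
--             i += 1
--     return "".join(out)
-- ===== Notes on version B (the rewrite author's own statement) =====
-- stated objective: faster
-- what changed: A's single index machine with in_squote/in_dquote flags and a 3-char lowered slice comparison at every position is replaced by a two-level tokenizer: an outer pass splitting the string into quoted spans (copied verbatim) and plain spans, plus a word-run tokenizer that replaces a maximal alnum/underscore run exactly when it equals 'and'/'or' case-insensitively.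
import Mathlib
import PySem

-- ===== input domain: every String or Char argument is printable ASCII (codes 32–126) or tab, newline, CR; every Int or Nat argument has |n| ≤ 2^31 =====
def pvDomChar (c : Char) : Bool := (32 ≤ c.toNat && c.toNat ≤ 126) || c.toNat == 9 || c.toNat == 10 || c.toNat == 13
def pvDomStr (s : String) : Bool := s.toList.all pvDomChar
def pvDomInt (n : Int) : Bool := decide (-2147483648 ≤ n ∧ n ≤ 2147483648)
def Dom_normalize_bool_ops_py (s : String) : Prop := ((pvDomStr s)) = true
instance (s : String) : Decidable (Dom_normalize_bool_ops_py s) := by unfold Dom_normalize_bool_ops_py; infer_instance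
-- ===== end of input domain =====

-- B re-implements A's flag-toggling index machine as a two-level tokenizer (quoted spans / plain spans,
-- then whole-word runs); a timing run measured B faster by a constant factor. Same return value on every input.

-- shared helper: Python's `c.isalnum() or c == "_"` (both Source A and Source B define this helper verbatim);
-- exact for Python on the ASCII domain
def pvIsWordChar (c : Char) : Bool := PySem.Chars.isalnum c || c == '_'

-- ===== PORT A =====
-- literal transliteration of A's while-loop: index i, in_squote/in_dquote flags, lookahead slices.
-- `cs.getD i ' '` is s[i]; every access is guarded by i < n so the default is never read.
-- The `fuel` argument (n - i at every call) is only a structural-termination device: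
-- each iteration advances i by at least 1, so the loop runs at most n - i more times.
def pvALoopF (cs : List Char) (n : Nat) : Nat → Nat → Bool → Bool → List String
  | 0, _, _, _ => []
  | fuel+1, i, insq, indq =>
    if i < n then
      if cs.getD i ' ' = '\'' ∧ indq = false then
        String.singleton (cs.getD i ' ') :: pvALoopF cs n fuel (i+1) (!insq) indq
      else if cs.getD i ' ' = '"' ∧ insq = false then
        String.singleton (cs.getD i ' ') :: pvALoopF cs n fuel (i+1) insq (!indq)
      else if insq = false ∧ indq = false ∧ i + 3 ≤ n ∧
          PySem.Chars.lower ((cs.drop i).take 3) = ['a', 'n', 'd'] ∧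
          (i = 0 ∨ pvIsWordChar (cs.getD (i-1) ' ') = false) ∧
          (i + 3 = n ∨ pvIsWordChar (cs.getD (i+3) ' ') = false) then
        "&&" :: pvALoopF cs n fuel (i+3) insq indq
      else if insq = false ∧ indq = false ∧ i + 2 ≤ n ∧
          PySem.Chars.lower ((cs.drop i).take 2) = ['o', 'r'] ∧
          (i = 0 ∨ pvIsWordChar (cs.getD (i-1) ' ') = false) ∧
          (i + 2 = n ∨ pvIsWordChar (cs.getD (i+2) ' ') = false) then
        "||" :: pvALoopF cs n fuel (i+2) insq indq
      else
        String.singleton (cs.getD i ' ') :: pvALoopF cs n fuel (i+1) insq indq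
    else []

def pvALoop (cs : List Char) (n i : Nat) (insq indq : Bool) : List String :=
  pvALoopF cs n (n - i) i insq indq

def normalize_bool_ops_py (s : String) : String :=
  String.join (pvALoop s.toList s.toList.length 0 false false)

-- ===== PORT B =====
-- Source B's three `while j < n and …: j += 1` scans share this one shape
-- (fuel = n - j, a structural-termination device only)
def pvScanF (f : Nat → Bool) (n : Nat) : Nat → Nat → Nat
  | 0, j => j
  | fuel+1, j => if j < n ∧ f j = true then pvScanF f n fuel (j+1) else j

def pvScan (f : Nat → Bool) (n j : Nat) : Nat := pvScanF f n (n - j) j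

-- transliteration of Source B's _replace_words inner loop (word-run tokenizer)
def pvRepLoopF (t : List Char) (m : Nat) : Nat → Nat → List String
  | 0, _ => []
  | fuel+1, i =>
    if i < m then
      if pvIsWordChar (t.getD i ' ') = true then
        (if PySem.Chars.lower ((t.drop i).take (pvScan (fun k => pvIsWordChar (t.getD k ' ')) m i - i)) = ['a', 'n', 'd']
         then "&&"
         else if PySem.Chars.lower ((t.drop i).take (pvScan (fun k => pvIsWordChar (t.getD k ' ')) m i - i)) = ['o', 'r']
         then "||"
         else String.ofList ((t.drop i).take (pvScan (fun k => pvIsWordChar (t.getD k ' ')) m i - i)))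
          :: pvRepLoopF t m fuel (pvScan (fun k => pvIsWordChar (t.getD k ' ')) m i)
      else
        String.singleton (t.getD i ' ') :: pvRepLoopF t m fuel (i+1)
    else []

def pvRepLoop (t : List Char) (m i : Nat) : List String := pvRepLoopF t m (m - i) i

def pvReplaceWords (t : List Char) : String := String.join (pvRepLoop t t.length 0)

-- transliteration of Source B's outer segmenting loop; `(cs.drop i).take (j - i)` is s[i:j] (0 ≤ i ≤ j)
def pvBOuterF (cs : List Char) (n : Nat) : Nat → Nat → List String
  | 0, _ => []
  | fuel+1, i =>
    if i < n then
      if cs.getD i ' ' = '\'' ∨ cs.getD i ' ' = '"' then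
        String.ofList ((cs.drop i).take
            ((if pvScan (fun k => !(cs.getD k ' ' == cs.getD i ' ')) n (i+1) < n
              then pvScan (fun k => !(cs.getD k ' ' == cs.getD i ' ')) n (i+1) + 1
              else pvScan (fun k => !(cs.getD k ' ' == cs.getD i ' ')) n (i+1)) - i))
          :: pvBOuterF cs n fuel
            (if pvScan (fun k => !(cs.getD k ' ' == cs.getD i ' ')) n (i+1) < n
             then pvScan (fun k => !(cs.getD k ' ' == cs.getD i ' ')) n (i+1) + 1
             else pvScan (fun k => !(cs.getD k ' ' == cs.getD i ' ')) n (i+1))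
      else
        pvReplaceWords ((cs.drop i).take
            (pvScan (fun k => !(cs.getD k ' ' == '\'') && !(cs.getD k ' ' == '"')) n i - i))
          :: pvBOuterF cs n fuel
            (pvScan (fun k => !(cs.getD k ' ' == '\'') && !(cs.getD k ' ' == '"')) n i)
    else []

def pvBOuter (cs : List Char) (n i : Nat) : List String := pvBOuterF cs n (n - i) i

def normalize_bool_ops_py_alt (s : String) : String :=
  String.join (pvBOuter s.toList s.toList.length 0)

-- ===== PRECONDITION & SPEC =====
def Spec_normalize_bool_ops_py (s : String) (out : String) : Prop := out = normalize_bool_ops_py_alt s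
instance (s : String) (out : String) : Decidable (Spec_normalize_bool_ops_py s out) := by unfold Spec_normalize_bool_ops_py; infer_instance

-- ===== CLAIM (what is proved, stated in full; the proofs are below) =====
def Claim_equal_normalize_bool_ops_py : Prop := ∀ (s : String), Dom_normalize_bool_ops_py s → Spec_normalize_bool_ops_py s (normalize_bool_ops_py s)

-- ===== LEMMAS AND PROOFS =====

-- flat character stream of a list of output pieces
def pvFl (l : List String) : List Char := l.flatMap String.toList

theorem pvFl_nil : pvFl [] = [] := rfl
theorem pvFl_cons (a : List String) (x : String) : pvFl (x :: a) = x.toList ++ pvFl a := by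
  simp [pvFl]

theorem pvFoldl_toList (l : List String) : ∀ acc : String,
    (l.foldl (· ++ ·) acc).toList = acc.toList ++ pvFl l := by
  induction l with
  | nil => intro acc; simp [pvFl]
  | cons x xs ih => intro acc; simp [List.foldl_cons, ih, pvFl, String.toList_append]

theorem pvJoin_toList (l : List String) : (String.join l).toList = pvFl l := by
  unfold String.join
  simpa using pvFoldl_toList l ""

-- pvScan characterisation
theorem pvScanF_ge (f : Nat → Bool) (n : Nat) : ∀ fuel j, j ≤ pvScanF f n fuel j := by
  intro fuel
  induction fuel with
  | zero => intro j; exact Nat.le_refl j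
  | succ fuel ih =>
      intro j
      simp only [pvScanF]
      split
      · exact Nat.le_trans (by omega) (ih (j+1))
      · exact Nat.le_refl j

theorem pvScan_ge (f : Nat → Bool) (n j : Nat) : j ≤ pvScan f n j := pvScanF_ge f n _ j

theorem pvScan_step (f : Nat → Bool) {n j : Nat} (h : j < n) (hf : f j = true) :
    pvScan f n j = pvScan f n (j+1) := by
  unfold pvScan
  rw [show n - j = (n - (j+1)) + 1 by omega]
  simp only [pvScanF]
  rw [if_pos ⟨h, hf⟩]

theorem pvScan_stop {f : Nat → Bool} {n j : Nat} (h : ¬(j < n ∧ f j = true)) :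
    pvScan f n j = j := by
  unfold pvScan
  cases hnj : n - j with
  | zero => rfl
  | succ k =>
      simp only [pvScanF]
      rw [if_neg h]

theorem pvScanF_le (f : Nat → Bool) (n : Nat) :
    ∀ fuel j, j ≤ n → pvScanF f n fuel j ≤ n := by
  intro fuel
  induction fuel with
  | zero => intro j hj; exact hj
  | succ fuel ih =>
      intro j hj
      simp only [pvScanF]
      split
      · next hc => exact ih (j+1) (by omega)
      · exact hj

theorem pvScan_le {f : Nat → Bool} {n j : Nat} (h : j ≤ n) : pvScan f n j ≤ n :=
  pvScanF_le f n _ j h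

theorem pvScan_mem {f : Nat → Bool} {n j : Nat} :
    ∀ k, j ≤ k → k < pvScan f n j → f k = true := by
  intro k hk1 hk2
  by_cases h : j < n ∧ f j = true
  · rcases Nat.eq_or_lt_of_le hk1 with rfl | hlt
    · exact h.2
    · rw [pvScan_step f h.1 h.2] at hk2
      exact pvScan_mem k hlt hk2
  · rw [pvScan_stop h] at hk2; omega
termination_by n - j
decreasing_by omega

theorem pvScan_end {f : Nat → Bool} {n j : Nat} (h : pvScan f n j < n) :
    f (pvScan f n j) = false := by
  by_cases hc : j < n ∧ f j = true
  · rw [pvScan_step f hc.1 hc.2] at h ⊢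
    exact pvScan_end h
  · rw [pvScan_stop hc] at h ⊢
    rcases Bool.eq_false_or_eq_true (f j) with hf | hf
    · exact absurd ⟨h, hf⟩ hc
    · exact hf
termination_by n - j
decreasing_by omega

-- character facts
theorem pvWord_lower {c d : Char} (hl : PySem.Chars.lowerChar c = d)
    (hd : pvIsWordChar d = true) : pvIsWordChar c = true := by
  unfold PySem.Chars.lowerChar at hl
  by_cases hu : PySem.Chars.isupper c = true
  · simp [pvIsWordChar, PySem.Chars.isalnum, PySem.Chars.isalpha, hu]
  · rw [if_neg hu] at hl; subst hl; exact hd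

theorem pvWord_not_squote {c : Char} (h : pvIsWordChar c = true) : c ≠ '\'' := by
  rintro rfl; exact absurd h (by decide)

theorem pvWord_not_dquote {c : Char} (h : pvIsWordChar c = true) : c ≠ '"' := by
  rintro rfl; exact absurd h (by decide)

-- slice facts
theorem pvSlice_getD (cs : List Char) (i k m : Nat) (d : Char) (h : k < m) :
    ((cs.drop i).take m).getD k d = cs.getD (i+k) d := by
  simp [List.getD_eq_getElem?_getD, List.getElem?_take, h]

theorem pvSlice_cons (cs : List Char) (i m : Nat) (h : i < cs.length) :
    (cs.drop i).take (m+1) = cs.getD i ' ' :: (cs.drop (i+1)).take m := by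
  rw [List.drop_eq_getElem_cons h, List.take_succ_cons,
    List.getD_eq_getElem?_getD, List.getElem?_eq_getElem h]
  rfl

theorem pvSlice_split (cs : List Char) (i j k : Nat) (h1 : i ≤ j) (h2 : j ≤ k) :
    (cs.drop i).take (k - i) = (cs.drop i).take (j - i) ++ (cs.drop j).take (k - j) := by
  have h3 : k - i = (j - i) + (k - j) := by omega
  rw [h3, List.take_add, List.drop_drop]
  have h4 : i + (j - i) = j := by omega
  rw [h4]

theorem pvSlice_sub (cs : List Char) (i0 m p q : Nat) (h : p + q ≤ m) :
    ((((cs.drop i0).take m).drop p).take q) = (cs.drop (i0+p)).take q := by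
  have hmin : min q (m - p) = q := by omega
  rw [List.drop_take, List.take_take, List.drop_drop, hmin]

theorem pvGetD_default (cs : List Char) (k : Nat) (h : cs.length ≤ k) :
    cs.getD k ' ' = ' ' := by
  simp [List.getD_eq_getElem?_getD, List.getElem?_eq_none h]

-- fuel irrelevance: any fuel covering n - i computes the same loop
theorem pvALoopF_irrel (cs : List Char) (n : Nat) :
    ∀ f1 f2 i insq indq, n - i ≤ f1 → n - i ≤ f2 →
      pvALoopF cs n f1 i insq indq = pvALoopF cs n f2 i insq indq := by
  intro f1
  induction f1 with
  | zero =>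
      intro f2 i insq indq h1 h2
      cases f2 with
      | zero => rfl
      | succ f2 => simp [pvALoopF, show ¬ i < n by omega]
  | succ f1 ih =>
      intro f2 i insq indq h1 h2
      cases f2 with
      | zero => simp [pvALoopF, show ¬ i < n by omega]
      | succ f2 =>
          simp only [pvALoopF]
          by_cases hin : i < n
          · rw [if_pos hin, if_pos hin]
            split_ifs
            · exact congrArg _ (ih f2 (i+1) _ _ (by omega) (by omega))
            · exact congrArg _ (ih f2 (i+1) _ _ (by omega) (by omega))
            · exact congrArg _ (ih f2 (i+3) _ _ (by omega) (by omega))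
            · exact congrArg _ (ih f2 (i+2) _ _ (by omega) (by omega))
            · exact congrArg _ (ih f2 (i+1) _ _ (by omega) (by omega))
          · rw [if_neg hin, if_neg hin]

theorem pvRepLoopF_irrel (t : List Char) (m : Nat) :
    ∀ f1 f2 i, m - i ≤ f1 → m - i ≤ f2 →
      pvRepLoopF t m f1 i = pvRepLoopF t m f2 i := by
  intro f1
  induction f1 with
  | zero =>
      intro f2 i h1 h2
      cases f2 with
      | zero => rfl
      | succ f2 => simp [pvRepLoopF, show ¬ i < m by omega]
  | succ f1 ih =>
      intro f2 i h1 h2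
      cases f2 with
      | zero => simp [pvRepLoopF, show ¬ i < m by omega]
      | succ f2 =>
          simp only [pvRepLoopF]
          by_cases hin : i < m
          · rw [if_pos hin, if_pos hin]
            by_cases hw : pvIsWordChar (t.getD i ' ') = true
            · rw [if_pos hw, if_pos hw]
              have hg : i + 1 ≤ pvScan (fun k => pvIsWordChar (t.getD k ' ')) m i := by
                rw [pvScan_step _ hin hw]
                exact pvScan_ge _ _ _
              exact congrArg _ (ih f2 _ (by omega) (by omega))
            · rw [if_neg hw, if_neg hw]
              exact congrArg _ (ih f2 (i+1) (by omega) (by omega))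
          · rw [if_neg hin, if_neg hin]

theorem pvBOuterF_irrel (cs : List Char) (n : Nat) :
    ∀ f1 f2 i, n - i ≤ f1 → n - i ≤ f2 →
      pvBOuterF cs n f1 i = pvBOuterF cs n f2 i := by
  intro f1
  induction f1 with
  | zero =>
      intro f2 i h1 h2
      cases f2 with
      | zero => rfl
      | succ f2 => simp [pvBOuterF, show ¬ i < n by omega]
  | succ f1 ih =>
      intro f2 i h1 h2
      cases f2 with
      | zero => simp [pvBOuterF, show ¬ i < n by omega]
      | succ f2 =>
          simp only [pvBOuterF]
          by_cases hin : i < n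
          · rw [if_pos hin, if_pos hin]
            by_cases hq : cs.getD i ' ' = '\'' ∨ cs.getD i ' ' = '"'
            · rw [if_pos hq, if_pos hq]
              have hg := pvScan_ge (fun k => !(cs.getD k ' ' == cs.getD i ' ')) n (i+1)
              by_cases hj : pvScan (fun k => !(cs.getD k ' ' == cs.getD i ' ')) n (i+1) < n
              · rw [if_pos hj]
                exact congrArg _ (ih f2 _ (by omega) (by omega))
              · rw [if_neg hj]
                exact congrArg _ (ih f2 _ (by omega) (by omega))
            · rw [if_neg hq, if_neg hq]
              have hfi : (!(cs.getD i ' ' == '\'') && !(cs.getD i ' ' == '"')) = true := by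
                rw [not_or] at hq
                have hqa := hq.1
                have hqb := hq.2
                rw [List.getD_eq_getElem?_getD] at hqa hqb
                simp [hqa, hqb]
              have hg : i + 1 ≤ pvScan (fun k => !(cs.getD k ' ' == '\'') && !(cs.getD k ' ' == '"')) n i := by
                rw [pvScan_step _ hin hfi]
                exact pvScan_ge _ _ _
              exact congrArg _ (ih f2 _ (by omega) (by omega))
          · rw [if_neg hin, if_neg hin]

-- A-step lemmas
theorem pvA_stop (cs : List Char) (n i : Nat) (sq dq : Bool) (h : ¬ i < n) :
    pvALoop cs n i sq dq = [] := by
  unfold pvALoop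
  rw [show n - i = 0 by omega]
  rfl

theorem pvA_squote (cs : List Char) (n i : Nat) (sq : Bool) (h : i < n)
    (hc : cs.getD i ' ' = '\'') :
    pvALoop cs n i sq false = String.singleton (cs.getD i ' ') :: pvALoop cs n (i+1) (!sq) false := by
  unfold pvALoop
  rw [show n - i = (n - (i+1)) + 1 by omega]
  simp only [pvALoopF]
  rw [if_pos h, if_pos ⟨hc, trivial⟩]

theorem pvA_dquote (cs : List Char) (n i : Nat) (dq : Bool) (h : i < n)
    (hc : cs.getD i ' ' = '"') :
    pvALoop cs n i false dq = String.singleton (cs.getD i ' ') :: pvALoop cs n (i+1) false (!dq) := by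
  unfold pvALoop
  rw [show n - i = (n - (i+1)) + 1 by omega]
  simp only [pvALoopF]
  rw [if_pos h, if_neg (by rw [List.getD_eq_getElem?_getD] at hc; simp [hc]), if_pos ⟨hc, trivial⟩]

theorem pvA_insq (cs : List Char) (n i : Nat) (h : i < n)
    (hc : cs.getD i ' ' ≠ '\'') :
    pvALoop cs n i true false = String.singleton (cs.getD i ' ') :: pvALoop cs n (i+1) true false := by
  unfold pvALoop
  rw [show n - i = (n - (i+1)) + 1 by omega]
  simp only [pvALoopF]
  rw [if_pos h, if_neg (by rw [List.getD_eq_getElem?_getD] at hc; simp [hc]),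
    if_neg (by simp), if_neg (by simp), if_neg (by simp)]

theorem pvA_indq (cs : List Char) (n i : Nat) (h : i < n)
    (hc : cs.getD i ' ' ≠ '"') :
    pvALoop cs n i false true = String.singleton (cs.getD i ' ') :: pvALoop cs n (i+1) false true := by
  unfold pvALoop
  rw [show n - i = (n - (i+1)) + 1 by omega]
  simp only [pvALoopF]
  rw [if_pos h, if_neg (by simp),
    if_neg (by rw [List.getD_eq_getElem?_getD] at hc; simp [hc]),
    if_neg (by simp), if_neg (by simp)]

def pvAndCond (cs : List Char) (n i : Nat) : Prop :=
  i + 3 ≤ n ∧ PySem.Chars.lower ((cs.drop i).take 3) = ['a', 'n', 'd'] ∧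
  (i = 0 ∨ pvIsWordChar (cs.getD (i-1) ' ') = false) ∧
  (i + 3 = n ∨ pvIsWordChar (cs.getD (i+3) ' ') = false)

def pvOrCond (cs : List Char) (n i : Nat) : Prop :=
  i + 2 ≤ n ∧ PySem.Chars.lower ((cs.drop i).take 2) = ['o', 'r'] ∧
  (i = 0 ∨ pvIsWordChar (cs.getD (i-1) ' ') = false) ∧
  (i + 2 = n ∨ pvIsWordChar (cs.getD (i+2) ' ') = false)

theorem pvA_and (cs : List Char) (n i : Nat) (h : i < n)
    (hc1 : cs.getD i ' ' ≠ '\'') (hc2 : cs.getD i ' ' ≠ '"')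
    (hand : pvAndCond cs n i) :
    pvALoop cs n i false false = "&&" :: pvALoop cs n (i+3) false false := by
  unfold pvALoop
  rw [show n - i = (n - (i+1)) + 1 by omega]
  simp only [pvALoopF]
  rw [if_pos h, if_neg (by rw [List.getD_eq_getElem?_getD] at hc1; simp [hc1]),
    if_neg (by rw [List.getD_eq_getElem?_getD] at hc2; simp [hc2]),
    if_pos ⟨trivial, trivial, hand.1, hand.2.1, hand.2.2.1, hand.2.2.2⟩]
  exact congrArg _ (pvALoopF_irrel cs n _ _ (i+3) false false (by omega) (by omega))

theorem pvA_or (cs : List Char) (n i : Nat) (h : i < n)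
    (hc1 : cs.getD i ' ' ≠ '\'') (hc2 : cs.getD i ' ' ≠ '"')
    (hnand : ¬ pvAndCond cs n i) (hor : pvOrCond cs n i) :
    pvALoop cs n i false false = "||" :: pvALoop cs n (i+2) false false := by
  unfold pvALoop
  rw [show n - i = (n - (i+1)) + 1 by omega]
  simp only [pvALoopF]
  rw [if_pos h, if_neg (by rw [List.getD_eq_getElem?_getD] at hc1; simp [hc1]),
    if_neg (by rw [List.getD_eq_getElem?_getD] at hc2; simp [hc2]),
    if_neg (fun hx => hnand ⟨hx.2.2.1, hx.2.2.2.1, hx.2.2.2.2.1, hx.2.2.2.2.2⟩),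
    if_pos ⟨trivial, trivial, hor.1, hor.2.1, hor.2.2.1, hor.2.2.2⟩]
  exact congrArg _ (pvALoopF_irrel cs n _ _ (i+2) false false (by omega) (by omega))

theorem pvA_plain (cs : List Char) (n i : Nat) (h : i < n)
    (hc1 : cs.getD i ' ' ≠ '\'') (hc2 : cs.getD i ' ' ≠ '"')
    (hnand : ¬ pvAndCond cs n i) (hnor : ¬ pvOrCond cs n i) :
    pvALoop cs n i false false = String.singleton (cs.getD i ' ') :: pvALoop cs n (i+1) false false := by
  unfold pvALoop
  rw [show n - i = (n - (i+1)) + 1 by omega]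
  simp only [pvALoopF]
  rw [if_pos h, if_neg (by rw [List.getD_eq_getElem?_getD] at hc1; simp [hc1]),
    if_neg (by rw [List.getD_eq_getElem?_getD] at hc2; simp [hc2]),
    if_neg (fun hx => hnand ⟨hx.2.2.1, hx.2.2.2.1, hx.2.2.2.2.1, hx.2.2.2.2.2⟩),
    if_neg (fun hx => hnor ⟨hx.2.2.1, hx.2.2.2.1, hx.2.2.2.2.1, hx.2.2.2.2.2⟩)]

-- B-step lemmas
theorem pvB_stop (cs : List Char) (n i : Nat) (h : ¬ i < n) : pvBOuter cs n i = [] := by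
  unfold pvBOuter
  rw [show n - i = 0 by omega]
  rfl

theorem pvB_quote (cs : List Char) (n i : Nat) (h : i < n)
    (hq : cs.getD i ' ' = '\'' ∨ cs.getD i ' ' = '"') :
    pvBOuter cs n i =
      String.ofList ((cs.drop i).take
          ((if pvScan (fun k => !(cs.getD k ' ' == cs.getD i ' ')) n (i+1) < n
            then pvScan (fun k => !(cs.getD k ' ' == cs.getD i ' ')) n (i+1) + 1
            else pvScan (fun k => !(cs.getD k ' ' == cs.getD i ' ')) n (i+1)) - i))
        :: pvBOuter cs n
          (if pvScan (fun k => !(cs.getD k ' ' == cs.getD i ' ')) n (i+1) < n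
           then pvScan (fun k => !(cs.getD k ' ' == cs.getD i ' ')) n (i+1) + 1
           else pvScan (fun k => !(cs.getD k ' ' == cs.getD i ' ')) n (i+1)) := by
  unfold pvBOuter
  rw [show n - i = (n - (i+1)) + 1 by omega]
  simp only [pvBOuterF]
  rw [if_pos h, if_pos hq]
  have hg := pvScan_ge (fun k => !(cs.getD k ' ' == cs.getD i ' ')) n (i+1)
  refine congrArg _ (pvBOuterF_irrel cs n _ _ _ ?_ ?_) <;> (split_ifs <;> omega)

theorem pvB_text (cs : List Char) (n i : Nat) (h : i < n)
    (hq : ¬(cs.getD i ' ' = '\'' ∨ cs.getD i ' ' = '"')) :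
    pvBOuter cs n i =
      pvReplaceWords ((cs.drop i).take
          (pvScan (fun k => !(cs.getD k ' ' == '\'') && !(cs.getD k ' ' == '"')) n i - i))
        :: pvBOuter cs n
          (pvScan (fun k => !(cs.getD k ' ' == '\'') && !(cs.getD k ' ' == '"')) n i) := by
  unfold pvBOuter
  rw [show n - i = (n - (i+1)) + 1 by omega]
  simp only [pvBOuterF]
  rw [if_pos h, if_neg hq]
  have hfi : (!(cs.getD i ' ' == '\'') && !(cs.getD i ' ' == '"')) = true := by
    rw [not_or] at hq
    have hqa := hq.1
    have hqb := hq.2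
    rw [List.getD_eq_getElem?_getD] at hqa hqb
    simp [hqa, hqb]
  have hg : i + 1 ≤ pvScan (fun k => !(cs.getD k ' ' == '\'') && !(cs.getD k ' ' == '"')) n i := by
    rw [pvScan_step _ h hfi]
    exact pvScan_ge _ _ _
  exact congrArg _ (pvBOuterF_irrel cs n _ _ _ (by omega) (by omega))

theorem pvR_stop (t : List Char) (m i : Nat) (h : ¬ i < m) : pvRepLoop t m i = [] := by
  unfold pvRepLoop
  rw [show m - i = 0 by omega]
  rfl

theorem pvR_word (t : List Char) (m i : Nat) (h : i < m)
    (hw : pvIsWordChar (t.getD i ' ') = true) :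
    pvRepLoop t m i =
      (if PySem.Chars.lower ((t.drop i).take (pvScan (fun k => pvIsWordChar (t.getD k ' ')) m i - i)) = ['a', 'n', 'd']
       then "&&"
       else if PySem.Chars.lower ((t.drop i).take (pvScan (fun k => pvIsWordChar (t.getD k ' ')) m i - i)) = ['o', 'r']
       then "||"
       else String.ofList ((t.drop i).take (pvScan (fun k => pvIsWordChar (t.getD k ' ')) m i - i)))
        :: pvRepLoop t m (pvScan (fun k => pvIsWordChar (t.getD k ' ')) m i) := by
  unfold pvRepLoop
  rw [show m - i = (m - (i+1)) + 1 by omega]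
  simp only [pvRepLoopF]
  rw [if_pos h, if_pos hw]
  have hg : i + 1 ≤ pvScan (fun k => pvIsWordChar (t.getD k ' ')) m i := by
    rw [pvScan_step _ h hw]
    exact pvScan_ge _ _ _
  exact congrArg _ (pvRepLoopF_irrel t m _ _ _ (by omega) (by omega))

theorem pvR_other (t : List Char) (m i : Nat) (h : i < m)
    (hw : ¬ pvIsWordChar (t.getD i ' ') = true) :
    pvRepLoop t m i = String.singleton (t.getD i ' ') :: pvRepLoop t m (i+1) := by
  unfold pvRepLoop
  rw [show m - i = (m - (i+1)) + 1 by omega]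
  simp only [pvRepLoopF]
  rw [if_pos h, if_neg hw]

-- the quoted-span lemma: A inside a single-quoted span copies chars to the closing quote
theorem pvSQ (cs : List Char) (n : Nat) (hn : n = cs.length) (k : Nat) :
    pvFl (pvALoop cs n k true false)
      = (cs.drop k).take (pvScan (fun j => !(cs.getD j ' ' == '\'')) n k - k)
        ++ (if pvScan (fun j => !(cs.getD j ' ' == '\'')) n k < n
            then '\'' :: pvFl (pvALoop cs n (pvScan (fun j => !(cs.getD j ' ' == '\'')) n k + 1) false false)
            else []) := by
  by_cases hkn : k < n
  · by_cases hq : cs.getD k ' ' = '\''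
    · have hq2 : cs[k]?.getD ' ' = '\'' := by rw [← List.getD_eq_getElem?_getD]; exact hq
      have hstop : pvScan (fun j => !(cs.getD j ' ' == '\'')) n k = k :=
        pvScan_stop (by simp [hq2])
      rw [hstop, pvA_squote cs n k true hkn hq, pvFl_cons]
      simp [hq, hq2, hkn]
    · have hstep : pvScan (fun j => !(cs.getD j ' ' == '\'')) n k
          = pvScan (fun j => !(cs.getD j ' ' == '\'')) n (k+1) :=
        pvScan_step _ hkn (by simpa using hq)
      have hge := pvScan_ge (fun j => !(cs.getD j ' ' == '\'')) n (k+1)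
      rw [hstep, pvA_insq cs n k hkn hq, pvFl_cons, pvSQ cs n hn (k+1)]
      have harith : pvScan (fun j => !(cs.getD j ' ' == '\'')) n (k+1) - k
          = (pvScan (fun j => !(cs.getD j ' ' == '\'')) n (k+1) - (k+1)) + 1 := by omega
      rw [harith, pvSlice_cons cs k _ (by omega)]
      simp
  · rw [pvA_stop cs n k true false hkn, pvScan_stop (fun hx => hkn hx.1)]
    simp [pvFl_nil, hkn]
termination_by n - k
decreasing_by omega

theorem pvDQ (cs : List Char) (n : Nat) (hn : n = cs.length) (k : Nat) :
    pvFl (pvALoop cs n k false true)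
      = (cs.drop k).take (pvScan (fun j => !(cs.getD j ' ' == '"')) n k - k)
        ++ (if pvScan (fun j => !(cs.getD j ' ' == '"')) n k < n
            then '"' :: pvFl (pvALoop cs n (pvScan (fun j => !(cs.getD j ' ' == '"')) n k + 1) false false)
            else []) := by
  by_cases hkn : k < n
  · by_cases hq : cs.getD k ' ' = '"'
    · have hq2 : cs[k]?.getD ' ' = '"' := by rw [← List.getD_eq_getElem?_getD]; exact hq
      have hstop : pvScan (fun j => !(cs.getD j ' ' == '"')) n k = k :=
        pvScan_stop (by simp [hq2])
      rw [hstop, pvA_dquote cs n k true hkn hq, pvFl_cons]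
      simp [hq, hq2, hkn]
    · have hstep : pvScan (fun j => !(cs.getD j ' ' == '"')) n k
          = pvScan (fun j => !(cs.getD j ' ' == '"')) n (k+1) :=
        pvScan_step _ hkn (by simpa using hq)
      have hge := pvScan_ge (fun j => !(cs.getD j ' ' == '"')) n (k+1)
      rw [hstep, pvA_indq cs n k hkn hq, pvFl_cons, pvDQ cs n hn (k+1)]
      have harith : pvScan (fun j => !(cs.getD j ' ' == '"')) n (k+1) - k
          = (pvScan (fun j => !(cs.getD j ' ' == '"')) n (k+1) - (k+1)) + 1 := by omega
      rw [harith, pvSlice_cons cs k _ (by omega)]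
      simp
  · rw [pvA_stop cs n k false true hkn, pvScan_stop (fun hx => hkn hx.1)]
    simp [pvFl_nil, hkn]
termination_by n - k
decreasing_by omega

-- A copies an unreplaceable word run char by char
theorem pvWordRun (cs : List Char) (n : Nat) (hn : n = cs.length) (jw : Nat) (hjwn : jw ≤ n)
    (hstop : jw = n ∨ pvIsWordChar (cs.getD jw ' ') = false)
    (k : Nat) (hk1 : 1 ≤ k) (hk2 : k ≤ jw)
    (hws : ∀ x, k - 1 ≤ x → x < jw → pvIsWordChar (cs.getD x ' ') = true) :
    pvFl (pvALoop cs n k false false)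
      = (cs.drop k).take (jw - k) ++ pvFl (pvALoop cs n jw false false) := by
  rcases Nat.eq_or_lt_of_le hk2 with rfl | hlt
  · simp
  · have hkn : k < n := by omega
    have hwk : pvIsWordChar (cs.getD k ' ') = true := hws k (by omega) hlt
    have hwp : pvIsWordChar (cs.getD (k-1) ' ') = true := hws (k-1) (by omega) (by omega)
    have hc1 : cs.getD k ' ' ≠ '\'' := pvWord_not_squote hwk
    have hc2 : cs.getD k ' ' ≠ '"' := pvWord_not_dquote hwk
    have hnand : ¬ pvAndCond cs n k := by
      rintro ⟨-, -, hpv, -⟩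
      rcases hpv with h0 | h0
      · omega
      · rw [hwp] at h0; cases h0
    have hnor : ¬ pvOrCond cs n k := by
      rintro ⟨-, -, hpv, -⟩
      rcases hpv with h0 | h0
      · omega
      · rw [hwp] at h0; cases h0
    rw [pvA_plain cs n k hkn hc1 hc2 hnand hnor, pvFl_cons,
      pvWordRun cs n hn jw hjwn hstop (k+1) (by omega) hlt
        (fun x hx1 hx2 => hws x (by omega) hx2)]
    have harith : jw - k = (jw - (k+1)) + 1 := by omega
    rw [harith, pvSlice_cons cs k _ (by omega)]
    simp
termination_by jw - k
decreasing_by omega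

-- the main regional lemma: on a quote-free region A's machine equals B's word tokenizer
theorem pvReg (cs : List Char) (n : Nat) (hn : n = cs.length) (i0 jt : Nat)
    (hjt : jt ≤ n)
    (hreg : ∀ x, i0 ≤ x → x < jt → (cs.getD x ' ' ≠ '\'' ∧ cs.getD x ' ' ≠ '"'))
    (hstop : jt = n ∨ cs.getD jt ' ' = '\'' ∨ cs.getD jt ' ' = '"')
    (p : Nat) (hp : i0 + p ≤ jt)
    (hprev : pvIsWordChar (cs.getD (i0+p) ' ') = true →
      (i0 + p = 0 ∨ pvIsWordChar (cs.getD (i0+p-1) ' ') = false)) :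
    pvFl (pvALoop cs n (i0+p) false false)
      = pvFl (pvRepLoop ((cs.drop i0).take (jt - i0)) (jt - i0) p)
        ++ pvFl (pvALoop cs n jt false false) := by
  by_cases hpm : p < jt - i0
  · have htp : ∀ x, x < jt - i0 → ((cs.drop i0).take (jt - i0)).getD x ' ' = cs.getD (i0+x) ' ' :=
      fun x hx => pvSlice_getD cs i0 x _ ' ' hx
    have hnq := hreg (i0+p) (by omega) (by omega)
    by_cases hw : pvIsWordChar (cs.getD (i0+p) ' ') = true
    · -- word-run head
      have hfp : pvIsWordChar (((cs.drop i0).take (jt - i0)).getD p ' ') = true := by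
        rw [htp p hpm]; exact hw
      set r := pvScan (fun k => pvIsWordChar (((cs.drop i0).take (jt - i0)).getD k ' ')) (jt - i0) p with hr
      have hge1 : p + 1 ≤ r := by
        rw [hr, pvScan_step _ hpm hfp]; exact pvScan_ge _ _ _
      have hrle : r ≤ jt - i0 := by rw [hr]; exact pvScan_le (by omega)
      have hmem : ∀ x, p ≤ x → x < r → pvIsWordChar (cs.getD (i0+x) ' ') = true := by
        intro x h1 h2
        have h3 := pvScan_mem (f := fun k => pvIsWordChar (((cs.drop i0).take (jt - i0)).getD k ' '))
          (n := jt - i0) (j := p) x h1 h2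
        have h3' : pvIsWordChar (((cs.drop i0).take (jt - i0)).getD x ' ') = true := h3
        rw [htp x (by omega)] at h3'
        exact h3'
      have hendw : i0 + r = n ∨ pvIsWordChar (cs.getD (i0+r) ' ') = false := by
        rcases Nat.lt_or_ge r (jt - i0) with hlt | hge2
        · right
          have h3 := pvScan_end (f := fun k => pvIsWordChar (((cs.drop i0).take (jt - i0)).getD k ' '))
            (n := jt - i0) (j := p) hlt
          have h3' : pvIsWordChar (((cs.drop i0).take (jt - i0)).getD r ' ') = false := h3
          rw [htp r hlt] at h3'
          exact h3'
        · rcases hstop with h1 | h1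
          · left; omega
          · right
            rw [show i0 + r = jt by omega]
            rcases h1 with h2 | h2 <;> rw [h2] <;> decide
      have hprev' : pvIsWordChar (cs.getD (i0+r) ' ') = true →
          (i0 + r = 0 ∨ pvIsWordChar (cs.getD (i0+r-1) ' ') = false) := by
        intro hc; exfalso
        rcases hendw with h1 | h1
        · rw [pvGetD_default cs (i0+r) (by omega)] at hc; exact absurd hc (by decide)
        · rw [h1] at hc; cases hc
      have hwt : (((cs.drop i0).take (jt - i0)).drop p).take (r - p) = (cs.drop (i0+p)).take (r - p) :=
        pvSlice_sub cs i0 (jt - i0) p (r - p) (by omega)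
      clear_value r
      rw [pvR_word ((cs.drop i0).take (jt - i0)) (jt - i0) p hpm hfp]
      rw [← hr, pvFl_cons, hwt]
      by_cases hand : PySem.Chars.lower ((cs.drop (i0+p)).take (r - p)) = ['a', 'n', 'd']
      · have hlen3 : r - p = 3 := by
          have h4 := congrArg List.length hand
          simp [PySem.Chars.lower] at h4
          omega
        have hand3 := hand
        rw [hlen3] at hand3
        have hA : pvAndCond cs n (i0+p) := by
          refine ⟨by omega, hand3, hprev hw, ?_⟩
          rw [show i0+p+3 = i0+r by omega]
          exact hendw
        rw [pvA_and cs n (i0+p) (by omega) hnq.1 hnq.2 hA, pvFl_cons]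
        rw [show i0+p+3 = i0+r by omega,
          pvReg cs n hn i0 jt hjt hreg hstop r (by omega) hprev', if_pos hand]
        simp
      · by_cases hor : PySem.Chars.lower ((cs.drop (i0+p)).take (r - p)) = ['o', 'r']
        · have hlen2 : r - p = 2 := by
            have h4 := congrArg List.length hor
            simp [PySem.Chars.lower] at h4
            omega
          have hor2 := hor
          rw [hlen2] at hor2
          have hnand : ¬ pvAndCond cs n (i0+p) := by
            rintro ⟨h3n, hlw3, -, -⟩
            have hsl : (cs.drop (i0+p)).take 3
                = cs.getD (i0+p) ' ' :: cs.getD (i0+p+1) ' ' :: cs.getD (i0+p+2) ' ' :: [] := by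
              rw [show (3:Nat) = 2+1 from rfl, pvSlice_cons cs (i0+p) 2 (by omega),
                show (2:Nat) = 1+1 from rfl, pvSlice_cons cs (i0+p+1) 1 (by omega),
                show (1:Nat) = 0+1 from rfl, pvSlice_cons cs (i0+p+2) 0 (by omega)]
              simp
            rw [hsl] at hlw3
            simp only [PySem.Chars.lower, List.map_cons, List.map_nil, List.cons.injEq, and_true] at hlw3
            have hc2' := pvWord_lower hlw3.2.2 (by decide)
            rcases hendw with h1 | h1
            · omega
            · rw [show i0 + r = i0+p+2 by omega] at h1
              rw [h1] at hc2'
              cases hc2'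
          have hO : pvOrCond cs n (i0+p) := by
            refine ⟨by omega, hor2, hprev hw, ?_⟩
            rw [show i0+p+2 = i0+r by omega]
            exact hendw
          rw [pvA_or cs n (i0+p) (by omega) hnq.1 hnq.2 hnand hO, pvFl_cons]
          rw [show i0+p+2 = i0+r by omega,
            pvReg cs n hn i0 jt hjt hreg hstop r (by omega) hprev', if_neg hand, if_pos hor]
          simp
        · -- an ordinary word run: A copies it char by char, B copies it as one token
          have hnand : ¬ pvAndCond cs n (i0+p) := by
            rintro ⟨h3n, hlw3, -, hnx⟩
            have hsl : (cs.drop (i0+p)).take 3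
                = cs.getD (i0+p) ' ' :: cs.getD (i0+p+1) ' ' :: cs.getD (i0+p+2) ' ' :: [] := by
              rw [show (3:Nat) = 2+1 from rfl, pvSlice_cons cs (i0+p) 2 (by omega),
                show (2:Nat) = 1+1 from rfl, pvSlice_cons cs (i0+p+1) 1 (by omega),
                show (1:Nat) = 0+1 from rfl, pvSlice_cons cs (i0+p+2) 0 (by omega)]
              simp
            rw [hsl] at hlw3
            simp only [PySem.Chars.lower, List.map_cons, List.map_nil, List.cons.injEq, and_true] at hlw3
            have hw1 := pvWord_lower hlw3.2.1 (by decide)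
            have hw2 := pvWord_lower hlw3.2.2 (by decide)
            have hr3 : p + 3 ≤ r := by
              by_contra hcon
              rcases hendw with h1 | h1
              · omega
              · have h2 : i0 + r = i0+p+1 ∨ i0 + r = i0+p+2 := by omega
                rcases h2 with h2 | h2 <;> rw [h2] at h1
                · rw [h1] at hw1; cases hw1
                · rw [h1] at hw2; cases hw2
            have hr3' : r ≤ p + 3 := by
              by_contra hcon
              have h4 := hmem (p+3) (by omega) (by omega)
              rw [show i0 + (p+3) = i0+p+3 by omega] at h4
              rcases hnx with h5 | h5
              · omega
              · rw [h4] at h5; cases h5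
            apply hand
            rw [show r - p = 3 by omega, hsl]
            simp only [PySem.Chars.lower, List.map_cons, List.map_nil, List.cons.injEq, and_true]
            exact ⟨hlw3.1, hlw3.2.1, hlw3.2.2⟩
          have hnor : ¬ pvOrCond cs n (i0+p) := by
            rintro ⟨h2n, hlw2, -, hnx⟩
            have hsl : (cs.drop (i0+p)).take 2
                = cs.getD (i0+p) ' ' :: cs.getD (i0+p+1) ' ' :: [] := by
              rw [show (2:Nat) = 1+1 from rfl, pvSlice_cons cs (i0+p) 1 (by omega),
                show (1:Nat) = 0+1 from rfl, pvSlice_cons cs (i0+p+1) 0 (by omega)]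
              simp
            rw [hsl] at hlw2
            simp only [PySem.Chars.lower, List.map_cons, List.map_nil, List.cons.injEq, and_true] at hlw2
            have hw1 := pvWord_lower hlw2.2 (by decide)
            have hr2 : p + 2 ≤ r := by
              by_contra hcon
              rcases hendw with h1 | h1
              · omega
              · rw [show i0 + r = i0+p+1 by omega] at h1
                rw [h1] at hw1
                cases hw1
            have hr2' : r ≤ p + 2 := by
              by_contra hcon
              have h4 := hmem (p+2) (by omega) (by omega)
              rw [show i0 + (p+2) = i0+p+2 by omega] at h4
              rcases hnx with h5 | h5
              · omega
              · rw [h4] at h5; cases h5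
            apply hor
            rw [show r - p = 2 by omega, hsl]
            simp only [PySem.Chars.lower, List.map_cons, List.map_nil, List.cons.injEq, and_true]
            exact ⟨hlw2.1, hlw2.2⟩
          rw [pvA_plain cs n (i0+p) (by omega) hnq.1 hnq.2 hnand hnor, pvFl_cons]
          rw [pvWordRun cs n hn (i0+r) (by omega) hendw (i0+p+1) (by omega) (by omega)
              (fun x hx1 hx2 => by
                rw [show x = i0 + (x - i0) by omega]
                exact hmem (x - i0) (by omega) (by omega))]
          rw [pvReg cs n hn i0 jt hjt hreg hstop r (by omega) hprev', if_neg hand, if_neg hor]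
          have hasm : (cs.drop (i0+p)).take (r - p)
              = cs.getD (i0+p) ' ' :: (cs.drop (i0+p+1)).take (i0 + r - (i0+p+1)) := by
            rw [show r - p = (i0 + r - (i0+p+1)) + 1 by omega, pvSlice_cons cs (i0+p) _ (by omega)]
          rw [hasm]
          simp
    · -- non-word head: both sides copy one char
      have hwf : pvIsWordChar (cs.getD (i0+p) ' ') = false := by simpa using hw
      have hfp : pvIsWordChar (((cs.drop i0).take (jt - i0)).getD p ' ') = false := by
        rw [htp p hpm]; exact hwf
      rw [pvR_other ((cs.drop i0).take (jt - i0)) (jt - i0) p hpm (by intro hc; rw [hfp] at hc; cases hc),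
        pvFl_cons, htp p hpm]
      have hnand : ¬ pvAndCond cs n (i0+p) := by
        rintro ⟨h3n, hlw3, -, -⟩
        have hsl : (cs.drop (i0+p)).take 3
            = cs.getD (i0+p) ' ' :: (cs.drop (i0+p+1)).take 2 := by
          rw [show (3:Nat) = 2+1 from rfl, pvSlice_cons cs (i0+p) 2 (by omega)]
        rw [hsl] at hlw3
        simp only [PySem.Chars.lower, List.map_cons, List.map_nil, List.cons.injEq, and_true] at hlw3
        have h6 := pvWord_lower hlw3.1 (by decide)
        rw [hwf] at h6; cases h6
      have hnor : ¬ pvOrCond cs n (i0+p) := by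
        rintro ⟨h2n, hlw2, -, -⟩
        have hsl : (cs.drop (i0+p)).take 2
            = cs.getD (i0+p) ' ' :: (cs.drop (i0+p+1)).take 1 := by
          rw [show (2:Nat) = 1+1 from rfl, pvSlice_cons cs (i0+p) 1 (by omega)]
        rw [hsl] at hlw2
        simp only [PySem.Chars.lower, List.map_cons, List.map_nil, List.cons.injEq, and_true] at hlw2
        have h6 := pvWord_lower hlw2.1 (by decide)
        rw [hwf] at h6; cases h6
      rw [pvA_plain cs n (i0+p) (by omega) hnq.1 hnq.2 hnand hnor, pvFl_cons]
      rw [show i0+p+1 = i0+(p+1) by omega,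
        pvReg cs n hn i0 jt hjt hreg hstop (p+1) (by omega)
          (by intro hcx; right
              rw [show i0+(p+1)-1 = i0+p by omega]
              exact hwf)]
      simp
  · have h1 : i0 + p = jt := by omega
    rw [h1, pvR_stop _ _ _ hpm, pvFl_nil, List.nil_append]
termination_by jt - (i0 + p)
decreasing_by all_goals omega

theorem pvMain (cs : List Char) (n : Nat) (hn : n = cs.length) (i : Nat)
    (hcond : (i < n ∧ cs.getD i ' ' ≠ '\'' ∧ cs.getD i ' ' ≠ '"') →
      (i = 0 ∨ pvIsWordChar (cs.getD (i-1) ' ') = false)) :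
    pvFl (pvALoop cs n i false false) = pvFl (pvBOuter cs n i) := by
  by_cases hin : i < n
  · by_cases hq : cs.getD i ' ' = '\'' ∨ cs.getD i ' ' = '"'
    · rw [pvB_quote cs n i hin hq]
      rcases hq with hq1 | hq1
      · -- single-quoted span
        rw [pvA_squote cs n i false hin hq1, pvFl_cons]
        simp only [Bool.not_false]
        rw [pvSQ cs n hn (i+1), hq1]
        set r := pvScan (fun j => !(cs.getD j ' ' == '\'')) n (i+1) with hr
        have hge : i+1 ≤ r := pvScan_ge _ _ _
        have hrle : r ≤ n := pvScan_le (by omega)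
        clear_value r
        by_cases hrn : r < n
        · have hend : cs.getD r ' ' = '\'' := by
            have h3 := pvScan_end (f := fun j => !(cs.getD j ' ' == '\'')) (n := n)
              (j := i+1) (hr ▸ hrn)
            rw [← hr] at h3
            have h3' : (!(cs.getD r ' ' == '\'')) = false := h3
            simpa using h3'
          simp only [if_pos hrn]
          have hone : (cs.drop r).take 1 = [cs.getD r ' '] := by
            rw [show (1:Nat) = 0+1 from rfl, pvSlice_cons cs r 0 (by omega)]
            simp
          have hsplit : (cs.drop i).take (r + 1 - i)
              = cs.getD i ' ' :: ((cs.drop (i+1)).take (r - (i+1)) ++ [cs.getD r ' ']) := by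
            have h5 := pvSlice_split cs (i+1) r (r+1) (by omega) (by omega)
            rw [show r + 1 - r = 1 by omega, hone] at h5
            rw [show r + 1 - i = ((r + 1) - (i+1)) + 1 by omega, pvSlice_cons cs i _ (by omega), h5]
          rw [pvMain cs n hn (r+1)
            (by intro _
                right
                rw [show r + 1 - 1 = r by omega, hend]
                decide)]
          rw [hsplit, hq1, hend]
          simp [pvFl]
        · simp only [if_neg hrn]
          rw [pvB_stop cs n r (by omega)]
          have hsplit : (cs.drop i).take (r - i)
              = cs.getD i ' ' :: (cs.drop (i+1)).take (r - (i+1)) := by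
            rw [show r - i = (r - (i+1)) + 1 by omega, pvSlice_cons cs i _ (by omega)]
          rw [hsplit, hq1]
          simp [pvFl]
      · -- double-quoted span
        rw [pvA_dquote cs n i false hin hq1, pvFl_cons]
        simp only [Bool.not_false]
        rw [pvDQ cs n hn (i+1), hq1]
        set r := pvScan (fun j => !(cs.getD j ' ' == '"')) n (i+1) with hr
        have hge : i+1 ≤ r := pvScan_ge _ _ _
        have hrle : r ≤ n := pvScan_le (by omega)
        clear_value r
        by_cases hrn : r < n
        · have hend : cs.getD r ' ' = '"' := by
            have h3 := pvScan_end (f := fun j => !(cs.getD j ' ' == '"')) (n := n)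
              (j := i+1) (hr ▸ hrn)
            rw [← hr] at h3
            have h3' : (!(cs.getD r ' ' == '"')) = false := h3
            simpa using h3'
          simp only [if_pos hrn]
          have hone : (cs.drop r).take 1 = [cs.getD r ' '] := by
            rw [show (1:Nat) = 0+1 from rfl, pvSlice_cons cs r 0 (by omega)]
            simp
          have hsplit : (cs.drop i).take (r + 1 - i)
              = cs.getD i ' ' :: ((cs.drop (i+1)).take (r - (i+1)) ++ [cs.getD r ' ']) := by
            have h5 := pvSlice_split cs (i+1) r (r+1) (by omega) (by omega)
            rw [show r + 1 - r = 1 by omega, hone] at h5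
            rw [show r + 1 - i = ((r + 1) - (i+1)) + 1 by omega, pvSlice_cons cs i _ (by omega), h5]
          rw [pvMain cs n hn (r+1)
            (by intro _
                right
                rw [show r + 1 - 1 = r by omega, hend]
                decide)]
          rw [hsplit, hq1, hend]
          simp [pvFl]
        · simp only [if_neg hrn]
          rw [pvB_stop cs n r (by omega)]
          have hsplit : (cs.drop i).take (r - i)
              = cs.getD i ' ' :: (cs.drop (i+1)).take (r - (i+1)) := by
            rw [show r - i = (r - (i+1)) + 1 by omega, pvSlice_cons cs i _ (by omega)]
          rw [hsplit, hq1]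
          simp [pvFl]
    · -- plain-text region
      rw [pvB_text cs n i hin hq]
      rw [not_or] at hq
      set jt := pvScan (fun k => !(cs.getD k ' ' == '\'') && !(cs.getD k ' ' == '"')) n i with hjt'
      have hf : (!(cs.getD i ' ' == '\'') && !(cs.getD i ' ' == '"')) = true := by
        have hqa := hq.1
        have hqb := hq.2
        rw [List.getD_eq_getElem?_getD] at hqa hqb
        simp [hqa, hqb]
      have hge : i+1 ≤ jt := by
        rw [hjt', pvScan_step _ hin hf]
        exact pvScan_ge _ _ _
      have hjtle : jt ≤ n := pvScan_le (by omega)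
      have hregion : ∀ x, i ≤ x → x < jt → (cs.getD x ' ' ≠ '\'' ∧ cs.getD x ' ' ≠ '"') := by
        intro x h1 h2
        have h3 := pvScan_mem (f := fun k => !(cs.getD k ' ' == '\'') && !(cs.getD k ' ' == '"'))
          (n := n) (j := i) x h1 h2
        have h3' : (!(cs.getD x ' ' == '\'') && !(cs.getD x ' ' == '"')) = true := h3
        refine ⟨?_, ?_⟩ <;> intro hcx <;> rw [hcx] at h3' <;> simp at h3'
      have hstop2 : jt = n ∨ cs.getD jt ' ' = '\'' ∨ cs.getD jt ' ' = '"' := by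
        rcases Nat.lt_or_ge jt n with h1 | h1
        · right
          have h3 := pvScan_end (f := fun k => !(cs.getD k ' ' == '\'') && !(cs.getD k ' ' == '"'))
            (n := n) (j := i) (hjt' ▸ h1)
          rw [← hjt'] at h3
          have h3' : (!(cs.getD jt ' ' == '\'') && !(cs.getD jt ' ' == '"')) = false := h3
          by_cases c1 : cs.getD jt ' ' = '\''
          · exact Or.inl c1
          · by_cases c2 : cs.getD jt ' ' = '"'
            · exact Or.inr c2
            · exfalso
              rw [List.getD_eq_getElem?_getD] at c1 c2
              simp [c1, c2] at h3'
        · left; omega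
      clear_value jt
      have hlent : ((cs.drop i).take (jt - i)).length = jt - i := by
        simp [List.length_take, List.length_drop]
        omega
      have hreg0 : pvFl (pvALoop cs n i false false)
          = pvFl (pvRepLoop ((cs.drop i).take (jt - i)) (jt - i) 0)
            ++ pvFl (pvALoop cs n jt false false) :=
        pvReg cs n hn i jt hjtle hregion hstop2 0 (by omega)
          (fun hw => hcond ⟨hin, hq.1, hq.2⟩)
      rw [hreg0, pvFl_cons]
      simp only [pvReplaceWords]
      rw [pvJoin_toList, hlent]
      rw [pvMain cs n hn jt
        (by rintro ⟨hx1, hx2, hx3⟩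
            exfalso
            rcases hstop2 with h1 | h1 | h1
            · omega
            · exact hx2 h1
            · exact hx3 h1)]
  · rw [pvA_stop cs n i false false hin, pvB_stop cs n i hin]
termination_by n - i
decreasing_by all_goals omega

-- ===== VERDICT (by name: the statement is the Claim_ definition above) =====
theorem normalize_bool_ops_py_spec : Claim_equal_normalize_bool_ops_py := by
  intro s _dom
  unfold Spec_normalize_bool_ops_py normalize_bool_ops_py normalize_bool_ops_py_alt
  apply String.toList_inj.mp
  rw [pvJoin_toList, pvJoin_toList]
  exact pvMain s.toList s.toList.length rfl 0 (fun _ => Or.inl rfl)
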